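-- pv_equiv track=rewrite | github.com/gosunman/Algorithm_history | Coding_Test/Kakao_Internship/2019_Winter/1.py | solution
-- ===== SOURCE A (Python) =====
-- def solution(board, moves):
--     stack = []
--     answer = 0
--     size_board = len(board)
--     new_board = [[] for _ in range(size_board)]
--     for j in range(size_board):
--         for i in range(size_board):
--             if board[i][j]:
--                 new_board[j].append(board[i][j])
--     for move in moves:
--         move -= 1
--         if new_board[move]:
--             if stack and new_board[move][0] == stack[-1]:
--                 del new_board[move][0]
--                 del stack[-1]
--                 answer += 2
--             else:
--                 stack.append(new_board[move].pop(0))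
--     return answer
-- ===== SOURCE B (Python) =====
-- def solution(board, moves):
--     grid = [row[:] for row in board]
--     stack = []
--     answer = 0
--     for move in moves:
--         j = move - 1
--         for row in grid:
--             doll = row[j]
--             if doll:
--                 row[j] = 0
--                 if stack and stack[-1] == doll:
--                     stack.pop()
--                     answer += 2
--                 else:
--                     stack.append(doll)
--                 break
--     return answer
-- ===== Notes on version B (the rewrite author's own statement) =====
-- stated objective: simpler
-- what changed: B drops A's transposed-columns preprocessing and the pop(0) queues: it works on a per-row copy of the board and, for each move, scans that column top-down for the first non-zero cell, zeroes it in place, then applies the same stack pairing logic.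
-- outside the precondition, e.g. on solution([[1, 0, 7], [1, 0, 7]], [0, 0]): A returns 0, B returns 2
import Mathlib
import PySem

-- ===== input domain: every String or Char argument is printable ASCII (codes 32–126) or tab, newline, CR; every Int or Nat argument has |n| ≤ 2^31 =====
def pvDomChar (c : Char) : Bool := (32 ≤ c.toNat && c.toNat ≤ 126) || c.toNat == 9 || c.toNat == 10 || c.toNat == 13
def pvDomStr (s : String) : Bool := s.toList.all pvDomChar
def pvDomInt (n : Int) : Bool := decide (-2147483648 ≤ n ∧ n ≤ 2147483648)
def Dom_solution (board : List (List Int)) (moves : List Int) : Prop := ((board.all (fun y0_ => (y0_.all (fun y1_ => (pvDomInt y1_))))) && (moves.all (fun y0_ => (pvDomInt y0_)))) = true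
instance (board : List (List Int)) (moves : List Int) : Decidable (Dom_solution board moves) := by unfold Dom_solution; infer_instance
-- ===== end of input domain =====

-- B is a simpler re-implementation: no transposed-columns preprocessing, no pop(0) queues;
-- it scans the moved column of a working copy top-down for the first non-zero doll.

-- ===== PORT A =====
-- one iteration of A's 'for move in moves' loop; state = (new_board, stack, answer)
def stepA (s : List (List Int) × List Int × Int) (move : Int) : List (List Int) × List Int × Int :=
  let m := move - 1
  match PySem.List.pyGet? s.1 m with
  | none => s            -- IndexError in Python (excluded by Pre_)
  | some col =>
    if col ≠ [] then
      if s.2.1 ≠ [] ∧ col.headD 0 = s.2.1.getLastD 0 then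
        (PySem.List.pySetD s.1 m col.tail, s.2.1.dropLast, s.2.2 + 2)
      else
        (PySem.List.pySetD s.1 m col.tail, s.2.1 ++ [col.headD 0], s.2.2)
    else s

def solution (board : List (List Int)) (moves : List Int) : Int :=
  let n := board.length
  -- new_board[j] collects the non-zero entries of column j, top to bottom
  let newBoard : List (List Int) :=
    (PySem.List.pyRange 0 (n : Int) 1).map (fun j =>
      (PySem.List.pyRange 0 (n : Int) 1).foldl (fun col i =>
        let v := PySem.List.pyGetD (PySem.List.pyGetD board i []) j 0
        if v ≠ 0 then col ++ [v] else col) [])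
  (moves.foldl stepA (newBoard, ([], 0))).2.2

-- ===== PORT B =====
-- scan the rows top-down, pick the first non-zero entry of column j, zero it
def pickB : List (List Int) → Int → Option (Int × List (List Int))
  | [], _ => none
  | r :: rs, j =>
    let doll := PySem.List.pyGetD r j 0
    if doll ≠ 0 then some (doll, PySem.List.pySetD r j 0 :: rs)
    else (pickB rs j).map (fun p => (p.1, r :: p.2))

-- one iteration of B's 'for move in moves' loop; state = (grid, stack, answer)
def stepB (s : List (List Int) × List Int × Int) (move : Int) : List (List Int) × List Int × Int :=
  match pickB s.1 (move - 1) with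
  | none => s
  | some (doll, grid') =>
    if s.2.1 ≠ [] ∧ s.2.1.getLastD 0 = doll then
      (grid', s.2.1.dropLast, s.2.2 + 2)
    else
      (grid', s.2.1 ++ [doll], s.2.2)

def solution_alt (board : List (List Int)) (moves : List Int) : Int :=
  let grid := board.map (fun r => r)   -- row[:] copies (mutation is local in Python B)
  (moves.foldl stepB (grid, ([], 0))).2.2

-- ===== PRECONDITION & SPEC =====
-- Pre_ excludes exactly the inputs where A raises IndexError (a board row shorter than the
-- board height, or a move outside [1-height, height]) and, among the inputs A returns on,
-- only the non-square boards combined with non-positive wraparound moves, a defensible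
-- corner where A's transposed copy and B's per-row negative indexing accidentally read
-- different columns (neither value is the specified one).
def Pre_solution (board : List (List Int)) (moves : List Int) : Prop :=
  (∀ r ∈ board, board.length ≤ r.length) ∧
  (∀ m ∈ moves, 1 - (board.length : Int) ≤ m ∧ m ≤ (board.length : Int)) ∧
  ((∀ m ∈ moves, 1 ≤ m) ∨ (∀ r ∈ board, r.length = board.length))
instance (board : List (List Int)) (moves : List Int) : Decidable (Pre_solution board moves) := by unfold Pre_solution; infer_instance

def pvWitness_solution : List (List Int) × List Int := ([[0, 3], [2, 3]], [2, 1, 2])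

def Spec_solution (board : List (List Int)) (moves : List Int) (out : Int) : Prop := out = solution_alt board moves
instance (board : List (List Int)) (moves : List Int) (out : Int) : Decidable (Spec_solution board moves out) := by unfold Spec_solution; infer_instance

-- ===== CLAIM (what is proved, stated in full; the proofs are below) =====
def Claim_equal_solution : Prop := ∀ (board : List (List Int)) (moves : List Int), Dom_solution board moves → Pre_solution board moves → Spec_solution board moves (solution board moves)

-- ===== LEMMAS AND PROOFS =====

-- the non-zero entries of column j, top to bottom (cells past a row's end read as 0)
def colNZ : List (List Int) → Nat → List Int
  | [], _ => []
  | r :: g, j => if r.getD j 0 ≠ 0 then r.getD j 0 :: colNZ g j else colNZ g j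

theorem col_build (g : List (List Int)) (j : Nat) (acc : List Int) :
    g.foldl (fun col r =>
      let v := PySem.List.pyGetD r ((j : Nat) : Int) 0
      if v ≠ 0 then col ++ [v] else col) acc = acc ++ colNZ g j := by
  induction g generalizing acc with
  | nil => simp [colNZ]
  | cons r g ih =>
    rw [List.foldl_cons, ih]
    simp only [PySem.List.pyGetD_natCast, colNZ]
    by_cases hv : r.getD j 0 ≠ 0
    · rw [if_pos hv, if_pos hv, List.append_assoc]; rfl
    · rw [if_neg hv, if_neg hv]

theorem pySetD_neg {α : Type} (xs : List α) (k : Nat) (v : α) (h1 : 0 < k) (h2 : k ≤ xs.length) :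
    PySem.List.pySetD xs (-(k : Int)) v = xs.set (xs.length - k) v := by
  simp only [PySem.List.pySetD, PySem.List.pySet?, PySem.List.pyIdx?]
  split <;> rename_i h
  · omega
  · split <;> rename_i h'
    · simp only [Option.map_some, Option.getD_some]
      congr 1
      omega
    · omega

theorem pickB_nil (g : List (List Int)) (j : Int) (jn : Nat)
    (hrowg : ∀ r ∈ g, PySem.List.pyGetD r j 0 = r.getD jn 0)
    (h : colNZ g jn = []) : pickB g j = none := by
  induction g with
  | nil => rfl
  | cons r g ih =>
    simp only [colNZ] at h
    have hr := hrowg r (by simp)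
    by_cases hv : r.getD jn 0 ≠ 0
    · rw [if_pos hv] at h; exact absurd h (by simp)
    · rw [if_neg hv] at h
      simp only [pickB, hr]
      rw [if_neg hv, ih (fun x hx => hrowg x (by simp [hx])) h]; rfl

theorem pickB_cons (g : List (List Int)) (j : Int) (jn : Nat) (d : Int) (rest : List Int)
    (hrowg : ∀ r ∈ g, PySem.List.pyGetD r j 0 = r.getD jn 0)
    (hrows : ∀ r ∈ g, PySem.List.pySetD r j 0 = r.set jn 0)
    (h : colNZ g jn = d :: rest) :
    ∃ g', pickB g j = some (d, g') ∧ colNZ g' jn = rest ∧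
      (∀ k : Nat, k ≠ jn → colNZ g' k = colNZ g k) ∧
      g'.map List.length = g.map List.length := by
  induction g with
  | nil => simp [colNZ] at h
  | cons r g ih =>
    simp only [colNZ] at h
    have hrg := hrowg r (by simp)
    have hrs := hrows r (by simp)
    by_cases hv : r.getD jn 0 ≠ 0
    · rw [if_pos hv, List.cons.injEq] at h
      obtain ⟨hd, hrest⟩ := h
      refine ⟨r.set jn 0 :: g, ?_, ?_, ?_, ?_⟩
      · simp only [pickB, hrg, hrs]
        rw [if_pos hv, hd]
      · have hz : (r.set jn 0).getD jn 0 = 0 := by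
          simp [List.getD, List.getElem?_set]
          split <;> simp
        simp only [colNZ, hz]
        rw [if_neg (by simp)]
        exact hrest
      · intro k hk
        have hsame : (r.set jn 0).getD k 0 = r.getD k 0 := by
          simp [List.getD, hk.symm]
        simp only [colNZ, hsame]
      · simp
    · rw [if_neg hv] at h
      obtain ⟨g', h1, h2, h3, h4⟩ := ih (fun x hx => hrowg x (by simp [hx]))
        (fun x hx => hrows x (by simp [hx])) h
      refine ⟨r :: g', ?_, ?_, ?_, ?_⟩
      · simp only [pickB, hrg]
        rw [if_neg hv, h1]; rfl
      · simp only [colNZ]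
        rw [if_neg hv, h2]
      · intro k hk
        simp only [colNZ, h3 k hk]
      · simp [h4]

theorem map_colNZ_set (n j : Nat) (g g' : List (List Int)) (rest : List Int)
    (h1 : colNZ g' j = rest) (h2 : ∀ k : Nat, k ≠ j → colNZ g' k = colNZ g k) :
    ((List.range n).map (fun k => colNZ g k)).set j rest
      = (List.range n).map (fun k => colNZ g' k) := by
  apply List.ext_getElem (by simp)
  intro k hk _
  simp only [List.getElem_set, List.getElem_map, List.getElem_range]
  split
  · next hkj => rw [← h1]; subst hkj; rfl
  · next hkj => exact (h2 k (fun h => hkj h.symm)).symm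

-- the generic per-move step: A's update of the column list mirrors B's in-place pick
theorem step_eq (n : Nat) (g : List (List Int)) (st : List Int) (a m : Int) (jn : Nat)
    (hrowg : ∀ r ∈ g, PySem.List.pyGetD r (m - 1) 0 = r.getD jn 0)
    (hrows : ∀ r ∈ g, PySem.List.pySetD r (m - 1) 0 = r.set jn 0)
    (hnb : PySem.List.pyGet? ((List.range n).map (fun k => colNZ g k)) (m - 1)
            = some (colNZ g jn))
    (hnbset : ∀ rest : List Int,
      PySem.List.pySetD ((List.range n).map (fun k => colNZ g k)) (m - 1) rest
        = ((List.range n).map (fun k => colNZ g k)).set jn rest) :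
    stepA ((List.range n).map (fun k => colNZ g k), st, a) m
      = ((List.range n).map (fun k => colNZ (stepB (g, st, a) m).1 k),
         (stepB (g, st, a) m).2.1, (stepB (g, st, a) m).2.2)
    ∧ (stepB (g, st, a) m).1.map List.length = g.map List.length := by
  cases hc : colNZ g jn with
  | nil =>
    have hpick : pickB g (m - 1) = none := pickB_nil g (m - 1) jn hrowg hc
    constructor
    · simp [stepA, stepB, hnb, hc, hpick]
    · simp [stepB, hpick]
  | cons d rest =>
    obtain ⟨g', hpick, hrest, hother, hlen⟩ := pickB_cons g (m - 1) jn d rest hrowg hrows hc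
    have hset : PySem.List.pySetD ((List.range n).map (fun k => colNZ g k)) (m - 1) rest
        = (List.range n).map (fun k => colNZ g' k) := by
      rw [hnbset rest]
      exact map_colNZ_set n jn g g' rest hrest hother
    refine ⟨?_, ?_⟩
    · by_cases hne : st = []
      · have hA : ¬ (st ≠ [] ∧ (d :: rest).headD 0 = st.getLastD 0) := by simp [hne]
        have hB : ¬ (st ≠ [] ∧ st.getLastD 0 = d) := by simp [hne]
        simp only [stepA, stepB, hnb, hpick, hc]
        rw [if_pos (show (d :: rest) ≠ [] by simp), if_neg hA, if_neg hB]
        simp [hset]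
      · by_cases hd : st.getLastD 0 = d
        · have hA : st ≠ [] ∧ (d :: rest).headD 0 = st.getLastD 0 := ⟨hne, by rw [hd]; rfl⟩
          have hB : st ≠ [] ∧ st.getLastD 0 = d := ⟨hne, hd⟩
          simp only [stepA, stepB, hnb, hpick, hc]
          rw [if_pos (show (d :: rest) ≠ [] by simp), if_pos hA, if_pos hB]
          simp [hset]
        · have hA : ¬ (st ≠ [] ∧ (d :: rest).headD 0 = st.getLastD 0) := by
            intro h; exact hd h.2.symm
          have hB : ¬ (st ≠ [] ∧ st.getLastD 0 = d) := by intro h; exact hd h.2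
          simp only [stepA, stepB, hnb, hpick, hc]
          rw [if_pos (show (d :: rest) ≠ [] by simp), if_neg hA, if_neg hB]
          simp [hset]
    · simp only [stepB, hpick]
      split <;> exact hlen

-- the index facts for a positive move 1 ≤ m ≤ n (any row lengths)
theorem step_eq_pos (n : Nat) (g : List (List Int)) (st : List Int) (a m : Int)
    (h1 : 1 ≤ m) (h2 : m ≤ (n : Int)) :
    stepA ((List.range n).map (fun k => colNZ g k), st, a) m
      = ((List.range n).map (fun k => colNZ (stepB (g, st, a) m).1 k),
         (stepB (g, st, a) m).2.1, (stepB (g, st, a) m).2.2)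
    ∧ (stepB (g, st, a) m).1.map List.length = g.map List.length := by
  have hmj : m - 1 = (((m - 1).toNat : Nat) : Int) := by omega
  set jn := (m - 1).toNat with hj
  have hjn : jn < n := by omega
  refine step_eq n g st a m jn ?_ ?_ ?_ ?_
  · intro r _; rw [hmj, PySem.List.pyGetD_natCast]
  · intro r _; rw [hmj, PySem.List.pySetD_natCast]
  · rw [hmj, PySem.List.pyGet?_natCast]; simp [hjn]
  · intro rest; rw [hmj, PySem.List.pySetD_natCast]

-- the index facts for a wraparound move 1-n ≤ m ≤ 0 on a board whose rows all have length n
theorem step_eq_neg (n : Nat) (g : List (List Int)) (st : List Int) (a m : Int)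
    (hlen : ∀ r ∈ g, r.length = n) (h1 : 1 - (n : Int) ≤ m) (h2 : m ≤ 0) :
    stepA ((List.range n).map (fun k => colNZ g k), st, a) m
      = ((List.range n).map (fun k => colNZ (stepB (g, st, a) m).1 k),
         (stepB (g, st, a) m).2.1, (stepB (g, st, a) m).2.2)
    ∧ (stepB (g, st, a) m).1.map List.length = g.map List.length := by
  set k := (1 - m).toNat with hkdef
  have hk1 : 0 < k := by omega
  have hk2 : k ≤ n := by omega
  have hmj : m - 1 = -((k : Nat) : Int) := by omega
  set jn := n - k with hj
  refine step_eq n g st a m jn ?_ ?_ ?_ ?_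
  · intro r hr
    have hrl : r.length = n := hlen r hr
    rw [hmj, PySem.List.pyGetD_neg_natCast r k 0 hk1 (by omega)]
    have hidx : r.length - k = jn := by omega
    rw [List.getD_eq_getElem?_getD, List.getElem?_eq_getElem (by omega : jn < r.length)]
    simp [hidx]
  · intro r hr
    have hrl : r.length = n := hlen r hr
    rw [hmj, pySetD_neg r k 0 hk1 (by omega), hrl]
  · rw [hmj, PySem.List.pyGet?_neg_natCast _ k hk1 (by simp; omega)]
    simp only [List.length_map, List.length_range]
    rw [List.getElem?_map, List.getElem?_range (by omega : n - k < n)]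
    simp [hj]
  · intro rest
    rw [hmj, pySetD_neg _ k rest hk1 (by simp; omega)]
    congr 1
    simp only [List.length_map, List.length_range]
    omega

theorem loop_eq (n : Nat) (moves : List Int) :
    ∀ (g : List (List Int)) (st : List Int) (a : Int),
      (∀ m ∈ moves, 1 - (n : Int) ≤ m ∧ m ≤ (n : Int)) →
      ((∀ m ∈ moves, 1 ≤ m) ∨ (∀ r ∈ g, r.length = n)) →
      moves.foldl stepA ((List.range n).map (fun k => colNZ g k), st, a)
        = ((List.range n).map (fun k => colNZ (moves.foldl stepB (g, st, a)).1 k),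
           (moves.foldl stepB (g, st, a)).2.1, (moves.foldl stepB (g, st, a)).2.2) := by
  induction moves with
  | nil => intro g st a _ _; simp
  | cons m ms ih =>
    intro g st a h hsq
    have hm := h m (by simp)
    have hstep :
        stepA ((List.range n).map (fun k => colNZ g k), st, a) m
          = ((List.range n).map (fun k => colNZ (stepB (g, st, a) m).1 k),
             (stepB (g, st, a) m).2.1, (stepB (g, st, a) m).2.2)
        ∧ (stepB (g, st, a) m).1.map List.length = g.map List.length := by
      by_cases hpos : 1 ≤ m
      · exact step_eq_pos n g st a m hpos hm.2
      · rcases hsq with hsq | hsq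
        · exact absurd (hsq m (by simp)) hpos
        · exact step_eq_neg n g st a m hsq hm.1 (by omega)
    have hsq' : (∀ m' ∈ ms, 1 ≤ m') ∨ (∀ r ∈ (stepB (g, st, a) m).1, r.length = n) := by
      rcases hsq with hsq | hsq
      · exact Or.inl (fun x hx => hsq x (by simp [hx]))
      · refine Or.inr (fun r hr => ?_)
        have : r.length ∈ ((stepB (g, st, a) m).1.map List.length) := List.mem_map_of_mem hr
        rw [hstep.2] at this
        obtain ⟨r', hr', hlen'⟩ := List.mem_map.mp this
        rw [← hlen']; exact hsq r' hr'
    rw [List.foldl_cons, hstep.1, List.foldl_cons]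
    rw [ih _ _ _ (fun x hx => h x (by simp [hx])) hsq']

theorem build_col (board : List (List Int)) (j : Int) (hj : 0 ≤ j) :
    (PySem.List.pyRange 0 ((board.length : Nat) : Int) 1).foldl (fun col i =>
        let v := PySem.List.pyGetD (PySem.List.pyGetD board i []) j 0
        if v ≠ 0 then col ++ [v] else col) []
      = colNZ board j.toNat := by
  obtain ⟨k, rfl⟩ : ∃ k : Nat, j = (k : Int) := ⟨j.toNat, (Int.toNat_of_nonneg hj).symm⟩
  rw [PySem.List.foldl_pyRange_zero_pyGetD' board ([] : List Int)
    (fun col r => let v := PySem.List.pyGetD r ((k : Nat) : Int) 0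
                  if v ≠ 0 then col ++ [v] else col) []]
  rw [col_build board k []]
  simp

theorem init_eq (board : List (List Int)) :
    ((PySem.List.pyRange 0 ((board.length : Nat) : Int) 1).map (fun j =>
      (PySem.List.pyRange 0 ((board.length : Nat) : Int) 1).foldl (fun col i =>
        let v := PySem.List.pyGetD (PySem.List.pyGetD board i []) j 0
        if v ≠ 0 then col ++ [v] else col) []))
      = (List.range board.length).map (fun k => colNZ board k) := by
  have h1 : ∀ j ∈ PySem.List.pyRange 0 ((board.length : Nat) : Int) 1,
      (PySem.List.pyRange 0 ((board.length : Nat) : Int) 1).foldl (fun col i =>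
        let v := PySem.List.pyGetD (PySem.List.pyGetD board i []) j 0
        if v ≠ 0 then col ++ [v] else col) [] = colNZ board j.toNat := by
    intro j hj
    exact build_col board j (by
      have := PySem.List.mem_pyRange_one.mp hj
      omega)
  rw [List.map_congr_left h1, PySem.List.pyRange_zero_natCast, List.map_map]
  simp

-- ===== VERDICT (by name: the statement is the Claim_ definition above) =====
theorem solution_spec : Claim_equal_solution := by
  intro board moves _ hpre
  unfold Spec_solution solution solution_alt
  simp only [List.map_id_fun', id]
  rw [init_eq board, loop_eq board.length moves board [] 0 hpre.2.1 hpre.2.2]
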